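-- pv_equiv track=rewrite | github.com/justits/algorithms | google_code_jam/2008/RoundQualification/TrainTimetable/Solution.py | find_trains
-- ===== SOURCE A (Python) =====
-- def find_trains(trip, empty):
--     trip = sorted(trip)
--     empty = sorted(empty)
--     i = 0
--     trains = 0
--     for t in trip:
--         if i < len(empty) and empty[i] <= t:
--             i += 1
--         else:
--             trains += 1
--     return trains
-- ===== SOURCE B (Python) =====
-- def find_trains(trip, empty):
--     # One merged chronological sweep: encode each empty at time e as event 2*e
--     # and each trip at time t as event 2*t+1, so sorting the single event list
--     # puts empties before trips at equal times; sweep once counting availables.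
--     events = sorted([2 * e for e in empty] + [2 * t + 1 for t in trip])
--     avail = 0
--     trains = 0
--     for ev in events:
--         if ev % 2:
--             if avail:
--                 avail -= 1
--             else:
--                 trains += 1
--         else:
--             avail += 1
--     return trains
-- ===== Notes on version B (the rewrite author's own statement) =====
-- stated objective: alternative
-- what changed: Replaces the two-sorted-lists pointer walk (index i into empty consumed against each trip) by a single merged chronological event stream (2*e for empties, 2*t+1 for trips, so ties put empties first) swept once with an 'available' counter.
import Mathlib
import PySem

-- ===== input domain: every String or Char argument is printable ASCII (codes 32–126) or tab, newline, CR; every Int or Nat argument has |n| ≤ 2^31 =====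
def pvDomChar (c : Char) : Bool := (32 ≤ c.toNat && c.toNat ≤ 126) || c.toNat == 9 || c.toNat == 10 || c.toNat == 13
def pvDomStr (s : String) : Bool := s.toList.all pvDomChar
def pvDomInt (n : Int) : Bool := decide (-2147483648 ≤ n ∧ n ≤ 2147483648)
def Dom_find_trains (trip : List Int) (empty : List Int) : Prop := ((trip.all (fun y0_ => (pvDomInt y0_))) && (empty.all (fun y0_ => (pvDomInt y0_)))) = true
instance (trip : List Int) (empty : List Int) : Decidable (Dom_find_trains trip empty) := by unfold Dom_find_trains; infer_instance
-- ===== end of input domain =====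

-- B replaces A's two-sorted-lists pointer walk with a single merged chronological
-- event sweep (alternative decomposition, same O(n log n) cost).


-- ===== PORT A =====
-- loop body of A: state (i, trains); 'empty[i]' sits under the guard 'i < len(empty)',
-- so the '.getD 0' default of the exact pyGet? is never taken
def stepA (es : List Int) (s : Int × Int) (t : Int) : Int × Int :=
  if s.1 < (es.length : Int) ∧ (PySem.List.pyGet? es s.1).getD 0 ≤ t then (s.1 + 1, s.2)
  else (s.1, s.2 + 1)

def find_trains (trip : List Int) (empty : List Int) : Int :=
  let ts := PySem.List.sorted trip (fun x => x) false
  let es := PySem.List.sorted empty (fun x => x) false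
  let r := ts.foldl (stepA es) (0, 0)
  r.2

-- ===== PORT B =====
-- loop body of B: state (avail, trains); 'if ev % 2:' / 'if avail:' are Python truthiness (≠ 0)
def stepB (s : Int × Int) (ev : Int) : Int × Int :=
  if PySem.Int.mod ev 2 ≠ 0 then
    (if s.1 ≠ 0 then (s.1 - 1, s.2) else (s.1, s.2 + 1))
  else (s.1 + 1, s.2)

def find_trains_alt (trip : List Int) (empty : List Int) : Int :=
  let events := PySem.List.sorted
      ((empty.map (fun e => 2 * e)) ++ (trip.map (fun t => 2 * t + 1))) (fun x => x) false
  let r := events.foldl stepB (0, 0)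
  r.2

-- ===== PRECONDITION & SPEC =====
def Spec_find_trains (trip : List Int) (empty : List Int) (out : Int) : Prop := out = find_trains_alt trip empty
instance (trip : List Int) (empty : List Int) (out : Int) : Decidable (Spec_find_trains trip empty out) := by unfold Spec_find_trains; infer_instance

-- ===== CLAIM (what is proved, stated in full; the proofs are below) =====
def Claim_equal_find_trains : Prop := ∀ (trip : List Int) (empty : List Int), Dom_find_trains trip empty → Spec_find_trains trip empty (find_trains trip empty)

-- ===== LEMMAS AND PROOFS =====

-- Common reference form of A's loop: trips against the remaining (sorted) empties.
def aLoop : List Int → List Int → Int → Int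
  | [], _, k => k
  | _ :: ts, [], k => aLoop ts [] (k + 1)
  | t :: ts, e :: es, k => if e ≤ t then aLoop ts es k else aLoop ts (e :: es) (k + 1)

-- A's indexed fold equals aLoop on the dropped suffix of the empties.
theorem foldA_eq_aLoop (es : List Int) :
    ∀ (ts : List Int) (i : Nat) (k : Int),
      (ts.foldl (stepA es) ((i : Int), k)).2 = aLoop ts (es.drop i) k := by
  intro ts
  induction ts with
  | nil => intro i k; simp [aLoop]
  | cons t ts ih =>
    intro i k
    rcases hd : es.drop i with _ | ⟨e, rest⟩
    · have hge : es.length ≤ i := by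
        by_contra h
        exact absurd hd (by simp [List.drop_eq_nil_iff]; omega)
      have hcond : ¬ ((i : Int) < (es.length : Int) ∧ (PySem.List.pyGet? es (i : Int)).getD 0 ≤ t) := by
        rintro ⟨h1, -⟩; omega
      simp only [List.foldl_cons, stepA, if_neg hcond]
      have h2 := ih i (k + 1)
      rw [hd] at h2
      rw [h2, aLoop]
    · have hget : es[i]? = some e := by
        have h := congrArg (fun l => l[0]?) hd
        simpa [List.getElem?_drop] using h
      have hlt : i < es.length := (List.getElem?_eq_some_iff.mp hget).1
      have hcond : ((i : Int) < (es.length : Int) ∧ (PySem.List.pyGet? es (i : Int)).getD 0 ≤ t)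
          ↔ (e ≤ t) := by
        rw [PySem.List.pyGet?_natCast, hget]
        simp
        omega
      have hd1 : es.drop (i + 1) = rest := by
        have h := congrArg List.tail hd
        simpa [List.tail_drop] using h
      by_cases he : e ≤ t
      · simp only [List.foldl_cons, stepA, if_pos (hcond.mpr he)]
        have h1 : ((i : Int) + 1) = ((i + 1 : Nat) : Int) := by push_cast; ring
        rw [h1, ih (i + 1) k, hd1, aLoop, if_pos he]
      · simp only [List.foldl_cons, stepA, if_neg (fun hc => he (hcond.mp hc))]
        have h2 := ih i (k + 1)
        rw [hd] at h2
        rw [h2, aLoop, if_neg he]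

theorem stepB_even (a k e : Int) : stepB (a, k) (2 * e) = (a + 1, k) := by
  simp [stepB]

theorem stepB_odd_pos (a k t : Int) (h : a ≠ 0) : stepB (a, k) (2 * t + 1) = (a - 1, k) := by
  simp [stepB, h]

theorem stepB_odd_zero (k t : Int) : stepB (0, k) (2 * t + 1) = (0, k + 1) := by
  simp [stepB]

-- sweeping a run of empty-events only increments 'avail', never 'trains'
theorem evenSweep (E : List Int) : ∀ (a k : Int),
    ((E.map (fun e => 2 * e)).foldl stepB (a, k)).2 = k := by
  induction E with
  | nil => intro a k; simp
  | cons e E ih =>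
    intro a k
    rw [List.map_cons, List.foldl_cons, stepB_even]
    exact ih (a + 1) k

-- sweeping trip-events only: each consumes an available past empty or adds a train
theorem oddSweep : ∀ (T P : List Int) (k : Int),
    (∀ p ∈ P, ∀ t ∈ T, p ≤ t) →
    ((T.map (fun t => 2 * t + 1)).foldl stepB ((P.length : Int), k)).2 = aLoop T P k := by
  intro T
  induction T with
  | nil => intro P k _; simp [aLoop]
  | cons t T ih =>
    intro P k hPT
    rw [List.map_cons, List.foldl_cons]
    rcases P with _ | ⟨p, P'⟩
    · rw [List.length_nil, Nat.cast_zero, stepB_odd_zero]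
      have h := ih [] (k + 1) (by simp)
      rw [List.length_nil, Nat.cast_zero] at h
      rw [h, aLoop]
    · have hp : p ≤ t := hPT p (by simp) t (by simp)
      have hc : (((p :: P').length : Nat) : Int) = (P'.length : Int) + 1 := by
        rw [List.length_cons]; push_cast; ring
      rw [hc, stepB_odd_pos _ _ _ (by omega)]
      have hc2 : ((P'.length : Int) + 1 - 1) = (P'.length : Int) := by ring
      rw [hc2, ih P' k (fun q hq u hu => hPT q (by simp [hq]) u (by simp [hu])), aLoop,
        if_pos hp]

theorem merge_cons_left (e t : Int) (E T : List Int) (h : e ≤ t) :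
    ((e :: E).map (fun x => 2 * x)).merge ((t :: T).map (fun x => 2 * x + 1))
        (fun a b => decide (a ≤ b))
      = (2 * e) :: (E.map (fun x => 2 * x)).merge ((t :: T).map (fun x => 2 * x + 1))
        (fun a b => decide (a ≤ b)) := by
  simp only [List.map_cons]
  rw [List.cons_merge_cons, if_pos (by simp only [decide_eq_true_eq]; omega)]

theorem merge_cons_right (e t : Int) (E T : List Int) (h : ¬ e ≤ t) :
    ((e :: E).map (fun x => 2 * x)).merge ((t :: T).map (fun x => 2 * x + 1))
        (fun a b => decide (a ≤ b))
      = (2 * t + 1) :: ((e :: E).map (fun x => 2 * x)).merge (T.map (fun x => 2 * x + 1))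
        (fun a b => decide (a ≤ b)) := by
  simp only [List.map_cons]
  rw [List.cons_merge_cons, if_neg (by simp only [decide_eq_true_eq]; omega)]

-- main correspondence: the merged event sweep equals A's pointer walk,
-- with 'avail' = number of already-seen unmatched empties P (all ≤ every future trip)
theorem mainSweep : ∀ (E T P : List Int) (k : Int),
    (∀ p ∈ P, ∀ t ∈ T, p ≤ t) → T.Pairwise (· ≤ ·) →
    (((E.map (fun e => 2 * e)).merge (T.map (fun t => 2 * t + 1))
        (fun a b => decide (a ≤ b))).foldl stepB ((P.length : Int), k)).2
      = aLoop T (P ++ E) k := by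
  intro E
  induction E with
  | nil =>
    intro T P k hPT _
    rw [List.map_nil, List.nil_merge, oddSweep T P k hPT, List.append_nil]
  | cons e E ihE =>
    intro T
    induction T with
    | nil =>
      intro P k _ _
      have hm : ((e :: E).map (fun x => 2 * x)).merge (([] : List Int).map (fun x => 2 * x + 1))
          (fun a b => decide (a ≤ b)) = (e :: E).map (fun x => 2 * x) := by simp
      rw [hm, evenSweep (e :: E) _ k, aLoop]
    | cons t T ihT =>
      intro P k hPT hT
      by_cases hle : e ≤ t
      · rw [merge_cons_left e t E T hle, List.foldl_cons, stepB_even]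
        have hPT' : ∀ p ∈ P ++ [e], ∀ u ∈ t :: T, p ≤ u := by
          intro p hp u hu
          rcases List.mem_append.mp hp with h2 | h2
          · exact hPT p h2 u hu
          · have hpe : p = e := by simpa using h2
            rcases List.mem_cons.mp hu with h3 | h3
            · omega
            · have := (List.pairwise_cons.mp hT).1 u h3
              omega
        have hlen : ((P.length : Int) + 1) = (((P ++ [e]).length : Nat) : Int) := by
          rw [List.length_append, List.length_cons, List.length_nil]; push_cast; ring
        rw [hlen, ihE (t :: T) (P ++ [e]) k hPT' hT]
        have : (P ++ [e]) ++ E = P ++ e :: E := by simp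
        rw [this]
      · rw [merge_cons_right e t E T hle, List.foldl_cons]
        have hT' : T.Pairwise (· ≤ ·) := (List.pairwise_cons.mp hT).2
        rcases P with _ | ⟨p, P'⟩
        · rw [List.length_nil, Nat.cast_zero, stepB_odd_zero]
          have h := ihT [] (k + 1) (by simp) hT'
          rw [List.length_nil, Nat.cast_zero, List.nil_append] at h
          rw [List.nil_append, h, aLoop, if_neg hle]
        · have hp : p ≤ t := hPT p (by simp) t (by simp)
          have hc : (((p :: P').length : Nat) : Int) = (P'.length : Int) + 1 := by
            rw [List.length_cons]; push_cast; ring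
          rw [hc, stepB_odd_pos _ _ _ (by omega)]
          have hc2 : ((P'.length : Int) + 1 - 1) = (P'.length : Int) := by ring
          rw [hc2, ihT P' k (fun q hq u hu => hPT q (by simp [hq]) u (by simp [hu])) hT',
            List.cons_append, aLoop, if_pos hp]

-- sorted of a concatenation of two already-sorted lists = their merge
theorem sorted_append_eq_merge (xs ys : List Int)
    (hx : xs.Pairwise (· ≤ ·)) (hy : ys.Pairwise (· ≤ ·)) :
    PySem.List.sorted (xs ++ ys) (fun x => x) false
      = xs.merge ys (fun a b => decide (a ≤ b)) := by
  apply List.eq_of_perm_of_sorted (le := fun a b : Int => a ≤ b)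
  · intro a b _ _ h1 h2; omega
  · exact PySem.List.sorted_pairwise _ _
  · have h := List.sorted_merge (le := fun a b : Int => decide (a ≤ b))
      (by intro a b c h1 h2; simp at h1 h2 ⊢; omega)
      (by intro a b; simp; omega) xs ys
      (hx.imp (by intro a b h; simpa using h)) (hy.imp (by intro a b h; simpa using h))
    exact h.imp (by intro a b h; simpa using h)
  · exact (PySem.List.sorted_perm _ _ _).trans (List.merge_perm_append _).symm

theorem find_trains_eq_alt (trip empty : List Int) :
    find_trains trip empty = find_trains_alt trip empty := by
  have hA : find_trains trip empty
      = aLoop (PySem.List.sorted trip (fun x => x) false)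
              (PySem.List.sorted empty (fun x => x) false) 0 := by
    have h := foldA_eq_aLoop (PySem.List.sorted empty (fun x => x) false)
      (PySem.List.sorted trip (fun x => x) false) 0 0
    simpa [find_trains] using h
  have hpx : ((PySem.List.sorted empty (fun x => x) false).map (fun e => 2 * e)).Pairwise
      (fun a b : Int => a ≤ b) :=
    (PySem.List.sorted_pairwise empty (fun x => x)).map _ (by intro a b h; omega)
  have hpy : ((PySem.List.sorted trip (fun x => x) false).map (fun t => 2 * t + 1)).Pairwise
      (fun a b : Int => a ≤ b) :=
    (PySem.List.sorted_pairwise trip (fun x => x)).map _ (by intro a b h; omega)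
  have hperm : (empty.map (fun e => 2 * e) ++ trip.map (fun t => 2 * t + 1)).Perm
      ((PySem.List.sorted empty (fun x => x) false).map (fun e => 2 * e)
        ++ (PySem.List.sorted trip (fun x => x) false).map (fun t => 2 * t + 1)) :=
    List.Perm.append ((PySem.List.sorted_perm empty _ _).map _).symm
      ((PySem.List.sorted_perm trip _ _).map _).symm
  have hev : PySem.List.sorted
      (empty.map (fun e => 2 * e) ++ trip.map (fun t => 2 * t + 1)) (fun x => x) false
      = ((PySem.List.sorted empty (fun x => x) false).map (fun e => 2 * e)).merge
          ((PySem.List.sorted trip (fun x => x) false).map (fun t => 2 * t + 1))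
          (fun a b => decide (a ≤ b)) := by
    rw [PySem.List.sorted_eq_sorted_of_perm _ _ _ (fun a b h => h) hperm]
    exact sorted_append_eq_merge _ _ hpx hpy
  have hM := mainSweep (PySem.List.sorted empty (fun x => x) false)
      (PySem.List.sorted trip (fun x => x) false) [] 0 (by simp)
      (PySem.List.sorted_pairwise trip (fun x => x))
  rw [hA]
  simp only [find_trains_alt, hev]
  simpa using hM.symm

-- ===== VERDICT (by name: the statement is the Claim_ definition above) =====
theorem find_trains_spec : Claim_equal_find_trains := by
  intro trip empty _
  unfold Spec_find_trains
  exact find_trains_eq_alt trip empty
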